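-- pv_equiv track=rewrite | github.com/t-tsekov/codefights-solutions | interview/squaresUnderQueenAttack.py | squaresUnderQueenAttack
-- ===== SOURCE A (Python) =====
-- def squaresUnderQueenAttack(n, queens, queries):
--
--     x = set()
--     y = set()
--     upper_diag = set()
--     lower_diag = set()
--
--     for queen in queens:
--         x.add(queen[0])
--         y.add(queen[1])
--         upper_diag.add(queen[1] + queen[0])
--         lower_diag.add(queen[1] - queen[0])
--
--     result = []
--     for query in queries:
--         result.append(query[0] in x or
--                       query[1] in y or
--                       (query[1] + query[0]) in upper_diag or
--                       (query[1] - query[0] in lower_diag))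
--
--     return result
-- ===== SOURCE B (Python) =====
-- def squaresUnderQueenAttack(n, queens, queries):
--     return [any(queen[0] == query[0] or
--                 queen[1] == query[1] or
--                 queen[1] + queen[0] == query[1] + query[0] or
--                 queen[1] - queen[0] == query[1] - query[0]
--                 for queen in queens)
--             for query in queries]
-- ===== Notes on version B (the rewrite author's own statement) =====
-- stated objective: simpler
-- what changed: Drops the four precomputed index sets; each query directly scans the queens with any() testing the four attack relations.
-- outside the precondition, e.g. on squaresUnderQueenAttack(2, [[5]], [[0, 0]]): A raises IndexError, B raises IndexError
import Mathlib
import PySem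

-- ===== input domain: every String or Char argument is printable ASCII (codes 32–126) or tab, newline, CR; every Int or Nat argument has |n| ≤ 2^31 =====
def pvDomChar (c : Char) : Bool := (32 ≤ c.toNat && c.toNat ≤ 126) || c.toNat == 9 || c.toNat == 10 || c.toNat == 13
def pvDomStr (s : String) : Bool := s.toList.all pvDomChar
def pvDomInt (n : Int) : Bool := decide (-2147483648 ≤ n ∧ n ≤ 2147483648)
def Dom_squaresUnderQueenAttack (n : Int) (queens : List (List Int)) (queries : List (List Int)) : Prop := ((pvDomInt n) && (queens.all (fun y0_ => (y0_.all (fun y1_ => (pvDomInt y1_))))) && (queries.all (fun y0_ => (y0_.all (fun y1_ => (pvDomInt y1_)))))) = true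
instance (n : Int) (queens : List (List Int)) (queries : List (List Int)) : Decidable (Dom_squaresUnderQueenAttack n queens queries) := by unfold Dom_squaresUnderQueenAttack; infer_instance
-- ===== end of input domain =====

-- B drops A's four precomputed index sets and instead scans the queens per query with any(); simpler, same result.

-- B drops A's four precomputed index sets and instead scans the queens per query with any(); simpler, same result.

-- ===== PORT A =====
-- the loop body over queens: add queen[0], queen[1], and the two diagonal keys to the four sets
def qstep (s : PySem.Set Int × PySem.Set Int × PySem.Set Int × PySem.Set Int)
    (queen : List Int) : PySem.Set Int × PySem.Set Int × PySem.Set Int × PySem.Set Int :=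
  -- queen[0], queen[1]: total form of pyGet?, exact under Pre_ (all rows have length ≥ 2)
  (PySem.Set.add s.1 (PySem.List.pyGetD queen 0 0),
   PySem.Set.add s.2.1 (PySem.List.pyGetD queen 1 0),
   PySem.Set.add s.2.2.1 (PySem.List.pyGetD queen 1 0 + PySem.List.pyGetD queen 0 0),
   PySem.Set.add s.2.2.2 (PySem.List.pyGetD queen 1 0 - PySem.List.pyGetD queen 0 0))

-- the Python builds four sets x, y, upper_diag, lower_diag in one loop over queens, then answers queries by membership
def squaresUnderQueenAttack (n : Int) (queens : List (List Int)) (queries : List (List Int)) : List Bool :=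
  let st := queens.foldl qstep
    (PySem.Set.empty, PySem.Set.empty, PySem.Set.empty, PySem.Set.empty)
  queries.map (fun query =>
    let a := PySem.List.pyGetD query 0 0
    let b := PySem.List.pyGetD query 1 0
    PySem.Set.contains st.1 a || PySem.Set.contains st.2.1 b ||
      PySem.Set.contains st.2.2.1 (b + a) || PySem.Set.contains st.2.2.2 (b - a))

-- ===== PORT B =====
def squaresUnderQueenAttack_alt (n : Int) (queens : List (List Int)) (queries : List (List Int)) : List Bool :=
  queries.map (fun query =>
    queens.any (fun queen =>
      let qa := PySem.List.pyGetD queen 0 0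
      let qb := PySem.List.pyGetD queen 1 0
      let a := PySem.List.pyGetD query 0 0
      let b := PySem.List.pyGetD query 1 0
      qa == a || qb == b || qb + qa == b + a || qb - qa == b - a))

-- ===== PRECONDITION & SPEC =====
-- Pre_ excludes exactly the inputs where the Python A raises IndexError: some row of queens or queries has fewer than 2 entries.
def Pre_squaresUnderQueenAttack (n : Int) (queens : List (List Int)) (queries : List (List Int)) : Prop :=
  (∀ q ∈ queens, 2 ≤ q.length) ∧ (∀ q ∈ queries, 2 ≤ q.length)
instance (n : Int) (queens : List (List Int)) (queries : List (List Int)) : Decidable (Pre_squaresUnderQueenAttack n queens queries) := by unfold Pre_squaresUnderQueenAttack; infer_instance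

def pvWitness_squaresUnderQueenAttack : Int × List (List Int) × List (List Int) :=
  (3, [[0, 1], [2, 2]], [[0, 0], [1, 2], [2, 0]])

def Spec_squaresUnderQueenAttack (n : Int) (queens : List (List Int)) (queries : List (List Int)) (out : List Bool) : Prop := out = squaresUnderQueenAttack_alt n queens queries
instance (n : Int) (queens : List (List Int)) (queries : List (List Int)) (out : List Bool) : Decidable (Spec_squaresUnderQueenAttack n queens queries out) := by unfold Spec_squaresUnderQueenAttack; infer_instance

-- ===== CLAIM (what is proved, stated in full; the proofs are below) =====
def Claim_equal_squaresUnderQueenAttack : Prop := ∀ (n : Int) (queens : List (List Int)) (queries : List (List Int)), Dom_squaresUnderQueenAttack n queens queries → Pre_squaresUnderQueenAttack n queens queries → Spec_squaresUnderQueenAttack n queens queries (squaresUnderQueenAttack n queens queries)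

-- ===== LEMMAS AND PROOFS =====

-- membership in each of the four folded sets ↔ already present, or some queen contributed the value
theorem queenFold_mem1 (queens : List (List Int))
    (s : PySem.Set Int × PySem.Set Int × PySem.Set Int × PySem.Set Int) (v : Int) :
    v ∈ (queens.foldl qstep s).1 ↔ v ∈ s.1 ∨ ∃ q ∈ queens, PySem.List.pyGetD q 0 0 = v := by
  induction queens generalizing s with
  | nil => simp
  | cons q rest ih =>
    simp only [List.foldl_cons]
    rw [ih (qstep s q)]
    simp only [qstep, PySem.Set.mem_add, List.exists_mem_cons_iff, eq_comm]; tauto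

theorem queenFold_mem2 (queens : List (List Int))
    (s : PySem.Set Int × PySem.Set Int × PySem.Set Int × PySem.Set Int) (v : Int) :
    v ∈ (queens.foldl qstep s).2.1 ↔ v ∈ s.2.1 ∨ ∃ q ∈ queens, PySem.List.pyGetD q 1 0 = v := by
  induction queens generalizing s with
  | nil => simp
  | cons q rest ih =>
    simp only [List.foldl_cons]
    rw [ih (qstep s q)]
    simp only [qstep, PySem.Set.mem_add, List.exists_mem_cons_iff, eq_comm]; tauto

theorem queenFold_mem3 (queens : List (List Int))
    (s : PySem.Set Int × PySem.Set Int × PySem.Set Int × PySem.Set Int) (v : Int) :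
    v ∈ (queens.foldl qstep s).2.2.1 ↔ v ∈ s.2.2.1 ∨ ∃ q ∈ queens, PySem.List.pyGetD q 1 0 + PySem.List.pyGetD q 0 0 = v := by
  induction queens generalizing s with
  | nil => simp
  | cons q rest ih =>
    simp only [List.foldl_cons]
    rw [ih (qstep s q)]
    simp only [qstep, PySem.Set.mem_add, List.exists_mem_cons_iff, eq_comm]; tauto

theorem queenFold_mem4 (queens : List (List Int))
    (s : PySem.Set Int × PySem.Set Int × PySem.Set Int × PySem.Set Int) (v : Int) :
    v ∈ (queens.foldl qstep s).2.2.2 ↔ v ∈ s.2.2.2 ∨ ∃ q ∈ queens, PySem.List.pyGetD q 1 0 - PySem.List.pyGetD q 0 0 = v := by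
  induction queens generalizing s with
  | nil => simp
  | cons q rest ih =>
    simp only [List.foldl_cons]
    rw [ih (qstep s q)]
    simp only [qstep, PySem.Set.mem_add, List.exists_mem_cons_iff, eq_comm]; tauto

-- ===== VERDICT (by name: the statement is the Claim_ definition above) =====
theorem squaresUnderQueenAttack_spec : Claim_equal_squaresUnderQueenAttack := by
  intro n queens queries _ _
  unfold Spec_squaresUnderQueenAttack squaresUnderQueenAttack squaresUnderQueenAttack_alt
  apply List.map_congr_left
  intro query _
  rw [Bool.eq_iff_iff]
  simp only [PySem.Set.contains_iff, Bool.or_eq_true, List.any_eq_true, beq_iff_eq,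
    queenFold_mem1, queenFold_mem2, queenFold_mem3, queenFold_mem4,
    PySem.Set.empty, List.not_mem_nil, false_or]
  constructor
  · rintro (((⟨q, hq, hv⟩ | ⟨q, hq, hv⟩) | ⟨q, hq, hv⟩) | ⟨q, hq, hv⟩) <;>
      exact ⟨q, hq, by tauto⟩
  · rintro ⟨q, hq, ((hv | hv) | hv) | hv⟩
    · exact Or.inl (Or.inl (Or.inl ⟨q, hq, hv⟩))
    · exact Or.inl (Or.inl (Or.inr ⟨q, hq, hv⟩))
    · exact Or.inl (Or.inr ⟨q, hq, hv⟩)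
    · exact Or.inr ⟨q, hq, hv⟩
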